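-- pv_equiv track=rewrite | github.com/holynomad/build-up-SQL-Python-expert | 241031_lv2.py | solution
-- ===== SOURCE A (Python) =====
-- def solution(k, tangerine):
--     # 크기별 개수를 저장할 딕셔너리
--     size_count = {}
--
--     # 각 크기별 귤의 개수 세기
--     for size in tangerine:
--         if size in size_count:
--             size_count[size] += 1
--         else:
--             size_count[size] = 1
--
--     # 개수 리스트 만들기
--     counts = list(size_count.values())
--
--     # 버블 정렬로 개수 내림차순 정렬
--     n = len(counts)
--     for i in range(n):
--         for j in range(0, n-i-1):
--             if counts[j] < counts[j+1]:
--                 counts[j], counts[j+1] = counts[j+1], counts[j]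
--
--     selected_types = 0  # 선택된 크기의 종류 수
--     total_selected = 0  # 선택된 귤의 총 개수
--
--     # k개를 채울 때까지 가장 많은 개수의 크기부터 선택
--     for count in counts:
--         selected_types += 1
--         total_selected += count
--         if total_selected >= k:
--             break
--
--     return selected_types
-- ===== SOURCE B (Python) =====
-- def solution(k, tangerine):
--     # count occurrences of each size
--     size_count = {}
--     for size in tangerine:
--         size_count[size] = size_count.get(size, 0) + 1
--
--     # bucket[c] = number of sizes occurring exactly c times; track the max count
--     bucket = {}
--     max_count = 0
--     for c in size_count.values():
--         bucket[c] = bucket.get(c, 0) + 1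
--         if max_count < c:
--             max_count = c
--
--     # walk count-values from the largest down, taking whole buckets greedily
--     selected_types = 0
--     total_selected = 0
--     for c in range(max_count, 0, -1):
--         for _ in range(bucket.get(c, 0)):
--             selected_types += 1
--             total_selected += c
--             if total_selected >= k:
--                 return selected_types
--     return selected_types
-- ===== Notes on version B (the rewrite author's own statement) =====
-- stated objective: faster
-- what changed: Replaces A's hand-written O(m^2) bubble sort of the per-size counts and its break-on-threshold scan by a bucket table (count-value -> how many sizes have that count) walked from the maximum count-value downwards, taking whole buckets until k is reached.
import Mathlib
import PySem

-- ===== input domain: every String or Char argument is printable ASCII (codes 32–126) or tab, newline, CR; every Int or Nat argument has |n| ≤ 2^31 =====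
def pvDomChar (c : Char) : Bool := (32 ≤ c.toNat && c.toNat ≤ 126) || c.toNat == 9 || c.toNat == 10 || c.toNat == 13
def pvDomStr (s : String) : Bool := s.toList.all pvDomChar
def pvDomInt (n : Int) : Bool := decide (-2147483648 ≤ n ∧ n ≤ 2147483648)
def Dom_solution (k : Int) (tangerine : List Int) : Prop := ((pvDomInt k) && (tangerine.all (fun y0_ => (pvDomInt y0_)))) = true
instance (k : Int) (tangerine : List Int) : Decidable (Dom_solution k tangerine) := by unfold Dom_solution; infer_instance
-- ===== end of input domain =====

-- B replaces A's hand-rolled O(m^2) bubble sort of the counts by a bucket table keyed by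
-- count-value walked from the maximum downwards (counting-sort style selection).

-- ===== PORT A =====
-- one inner-loop body: compare counts[j], counts[j+1], swap if out of order
def bubbleStep (l : List Int) (j : Int) : List Int :=
  match PySem.List.pyGet? l j, PySem.List.pyGet? l (j + 1) with
  | some a, some b =>
      if a < b then PySem.List.pySetD (PySem.List.pySetD l j b) (j + 1) a else l
  | _, _ => l

-- A's final loop: for count in counts: selected += 1; total += count; if total >= k: break
def greedyA (k : Int) : List Int → Int → Int → Int
  | [], selected, _ => selected
  | c :: rest, selected, total =>
      if total + c ≥ k then selected + 1 else greedyA k rest (selected + 1) (total + c)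

def solution (k : Int) (tangerine : List Int) : Int :=
  let sizeCount := tangerine.foldl
    (fun d s => if d.contains s then d.insert s (d.getD s 0 + 1) else d.insert s 1)
    PySem.Dict.empty
  let counts := sizeCount.values
  let n : Int := counts.length
  let sortedCounts := (PySem.List.pyRange 0 n 1).foldl
    (fun l i => (PySem.List.pyRange 0 (n - i - 1) 1).foldl bubbleStep l) counts
  greedyA k sortedCounts 0 0

-- ===== PORT B =====
-- inner loop: take up to `m` sizes all having count c; Sum.inr = early `return`
def takeBucket (k c : Int) : Nat → Int → Int → Sum (Int × Int) Int
  | 0, selected, total => Sum.inl (selected, total)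
  | m + 1, selected, total =>
      if total + c ≥ k then Sum.inr (selected + 1)
      else takeBucket k c m (selected + 1) (total + c)

-- outer loop over the countdown of count-values
def walkBuckets (k : Int) (bucket : PySem.Dict Int Int) : List Int → Int → Int → Int
  | [], selected, _ => selected
  | c :: cs, selected, total =>
      match takeBucket k c (bucket.getD c 0).toNat selected total with
      | Sum.inl (s, t) => walkBuckets k bucket cs s t
      | Sum.inr r => r

def solution_alt (k : Int) (tangerine : List Int) : Int :=
  let sizeCount := tangerine.foldl (fun d s => d.insert s (d.getD s 0 + 1)) PySem.Dict.empty
  let bm := sizeCount.values.foldl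
    (fun p c => (p.1.insert c (p.1.getD c 0 + 1), if p.2 < c then c else p.2))
    ((PySem.Dict.empty : PySem.Dict Int Int), (0 : Int))
  walkBuckets k bm.1 (PySem.List.pyRange bm.2 0 (-1)) 0 0

-- ===== PRECONDITION & SPEC =====
def Spec_solution (k : Int) (tangerine : List Int) (out : Int) : Prop := out = solution_alt k tangerine
instance (k : Int) (tangerine : List Int) (out : Int) : Decidable (Spec_solution k tangerine out) := by unfold Spec_solution; infer_instance

-- ===== CLAIM (what is proved, stated in full; the proofs are below) =====
def Claim_equal_solution : Prop := ∀ (k : Int) (tangerine : List Int), Dom_solution k tangerine → Spec_solution k tangerine (solution k tangerine)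

-- ===== LEMMAS AND PROOFS =====

-- structural form of one bubble pass bounded by m comparisons
def ppassN : Nat → List Int → List Int
  | 0, l => l
  | _ + 1, [] => []
  | _ + 1, [a] => [a]
  | m + 1, a :: b :: t => if a < b then b :: ppassN m (a :: t) else a :: ppassN m (b :: t)

theorem ppassN_nil (m : Nat) : ppassN m [] = [] := by cases m <;> rfl

theorem bubbleStep_nil (j : Int) : bubbleStep [] j = [] := by
  simp [bubbleStep, PySem.List.pyGet?, PySem.List.pyIdx?]

theorem bubbleStep_zero_single (a : Int) : bubbleStep [a] 0 = [a] := by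
  have h1 : (1:Int) = ((1:Nat):Int) := by norm_num
  simp only [bubbleStep]
  rw [show (0:Int) + 1 = (1:Int) by norm_num, h1, PySem.List.pyGet?_natCast]
  rfl

theorem bubbleStep_zero_cons (a b : Int) (t : List Int) :
    bubbleStep (a :: b :: t) 0 = if a < b then b :: a :: t else a :: b :: t := by
  have h0 : (0:Int) = ((0:Nat):Int) := by norm_num
  have h1 : (1:Int) = ((1:Nat):Int) := by norm_num
  have g0 : PySem.List.pyGet? (a :: b :: t) 0 = some a := by
    rw [h0, PySem.List.pyGet?_natCast]; rfl
  have g1 : PySem.List.pyGet? (a :: b :: t) (0 + 1) = some b := by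
    rw [show (0:Int) + 1 = (1:Int) by norm_num, h1, PySem.List.pyGet?_natCast]; rfl
  simp only [bubbleStep, g0, g1]
  by_cases hab : a < b
  · have s0 : PySem.List.pySetD (a :: b :: t) 0 b = b :: b :: t := by
      rw [h0, PySem.List.pySetD_natCast]; rfl
    have s1 : PySem.List.pySetD (b :: b :: t) 1 a = b :: a :: t := by
      rw [h1, PySem.List.pySetD_natCast]; rfl
    simp [hab, s0, s1]
  · simp [hab]

theorem bubbleStep_cons_succ (x : Int) (xs : List Int) (j : Nat) :
    bubbleStep (x :: xs) ((j : Int) + 1) = x :: bubbleStep xs (j : Int) := by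
  have c1 : ((j : Int) + 1) = ((j + 1 : Nat) : Int) := by push_cast; ring
  have c2 : ((j : Int) + 1 + 1) = ((j + 2 : Nat) : Int) := by push_cast; ring
  have gL1 : PySem.List.pyGet? (x :: xs) ((j:Int)+1) = xs[j]? := by
    rw [c1, PySem.List.pyGet?_natCast]; simp
  have gL2 : PySem.List.pyGet? (x :: xs) ((j:Int)+1+1) = xs[j+1]? := by
    rw [c2, PySem.List.pyGet?_natCast]
    rw [show j + 2 = (j+1) + 1 from rfl]
    simp
  have gR1 : PySem.List.pyGet? xs (j:Int) = xs[j]? := PySem.List.pyGet?_natCast xs j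
  have gR2 : PySem.List.pyGet? xs ((j:Int)+1) = xs[j+1]? := by
    rw [c1, PySem.List.pyGet?_natCast]
  simp only [bubbleStep, gL1, gL2, gR1, gR2]
  cases hj : xs[j]? with
  | none => rfl
  | some a =>
    cases hj1 : xs[j + 1]? with
    | none => rfl
    | some b =>
      by_cases hab : a < b
      · have s1 : PySem.List.pySetD (x::xs) ((j:Int)+1) b = x :: xs.set j b := by
          rw [c1, PySem.List.pySetD_natCast, List.set_cons_succ]
        have s2 : PySem.List.pySetD (x :: xs.set j b) ((j:Int)+1+1) a
            = x :: (xs.set j b).set (j+1) a := by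
          rw [c2, PySem.List.pySetD_natCast, show j + 2 = (j+1) + 1 from rfl,
            List.set_cons_succ]
        have s3 : PySem.List.pySetD xs (j:Int) b = xs.set j b :=
          PySem.List.pySetD_natCast xs j b
        have s4 : PySem.List.pySetD (xs.set j b) ((j:Int)+1) a = (xs.set j b).set (j+1) a := by
          rw [c1, PySem.List.pySetD_natCast]
        simp [hab, s1, s2, s3, s4]
      · simp [hab]

-- fold over shifted indices acts on the tail
theorem foldl_bubbleStep_map_succ (js : List Nat) :
    (∀ l, List.foldl (fun l (j : Nat) => bubbleStep l (j : Int)) l (js.map Nat.succ) =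
      match l with
      | [] => []
      | x :: xs => x :: List.foldl (fun l (j : Nat) => bubbleStep l (j : Int)) xs js) := by
  induction js with
  | nil => intro l; cases l <;> simp
  | cons j js ih =>
    intro l
    cases l with
    | nil =>
      simp only [List.map_cons, List.foldl_cons]
      have : bubbleStep [] ((Nat.succ j : Nat) : Int) = [] := bubbleStep_nil _
      rw [this]
      have := ih []
      simpa using this
    | cons x xs =>
      simp only [List.map_cons, List.foldl_cons]
      have hs : bubbleStep (x :: xs) ((Nat.succ j : Nat) : Int) = x :: bubbleStep xs (j : Int) := by
        have : ((Nat.succ j : Nat) : Int) = (j : Int) + 1 := by push_cast; ring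
        rw [this, bubbleStep_cons_succ]
      rw [hs]
      exact ih (x :: bubbleStep xs (j : Int))

theorem foldl_bubbleStep_range (m : Nat) :
    ∀ l, List.foldl (fun l (j : Nat) => bubbleStep l (j : Int)) l (List.range m) = ppassN m l := by
  induction m with
  | zero => intro l; simp [ppassN]
  | succ m ih =>
    intro l
    rw [List.range_succ_eq_map, List.foldl_cons]
    simp only [Nat.cast_zero]
    cases l with
    | nil =>
      rw [bubbleStep_nil, foldl_bubbleStep_map_succ, ppassN_nil]
    | cons a t =>
      cases t with
      | nil =>
        rw [bubbleStep_zero_single, foldl_bubbleStep_map_succ]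
        simp only [ih]
        rw [ppassN_nil]
        rfl
      | cons b t =>
        rw [bubbleStep_zero_cons]
        by_cases hab : a < b
        · simp only [hab, if_true]
          rw [foldl_bubbleStep_map_succ]
          simp only [ih]
          simp [ppassN, hab]
        · simp only [hab, if_false]
          rw [foldl_bubbleStep_map_succ]
          simp only [ih]
          simp [ppassN, hab]

-- the port's Int-indexed inner loop IS ppassN
theorem inner_eq_ppassN (m : Int) (l : List Int) :
    (PySem.List.pyRange 0 m 1).foldl bubbleStep l = ppassN m.toNat l := by
  rw [PySem.List.pyRange_zero, List.foldl_map]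
  exact foldl_bubbleStep_range m.toNat l

theorem ppassN_append (m : Nat) : ∀ (f r : List Int), m < f.length →
    ppassN m (f ++ r) = ppassN m f ++ r := by
  induction m with
  | zero => intro f r _; simp [ppassN]
  | succ m ih =>
    intro f r hm
    match f, hm with
    | [a], hm => simp at hm
    | a :: b :: t, hm =>
      simp only [List.cons_append, ppassN]
      by_cases hab : a < b
      · simp only [hab, if_true]
        rw [show a :: (t ++ r) = (a :: t) ++ r from rfl, ih (a :: t) r (by simp at hm ⊢; omega)]
        simp
      · simp only [hab, if_false]
        rw [show b :: (t ++ r) = (b :: t) ++ r from rfl, ih (b :: t) r (by simp at hm ⊢; omega)]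
        simp

theorem ppassN_full (m : Nat) : ∀ f : List Int, f.length = m + 1 →
    ∃ g x, ppassN m f = g ++ [x] ∧ (g ++ [x]).Perm f ∧ ∀ y ∈ f, x ≤ y := by
  induction m with
  | zero =>
    intro f hf
    match f, hf with
    | [a], _ =>
      exact ⟨[], a, rfl, List.Perm.refl _, by simp⟩
  | succ m ih =>
    intro f hf
    match f, hf with
    | a :: b :: t, hf =>
      simp only [ppassN]
      by_cases hab : a < b
      · simp only [hab, if_true]
        obtain ⟨g, x, he, hp, hx⟩ := ih (a :: t) (by simp at hf ⊢; omega)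
        refine ⟨b :: g, x, by simp [he], ?_, ?_⟩
        · exact (hp.cons b).trans (List.Perm.swap a b t)
        · intro z hz
          rcases List.mem_cons.1 hz with h | hz'
          · subst h; exact hx z (by simp)
          · rcases List.mem_cons.1 hz' with h | h
            · subst h; exact (hx a (by simp)).trans hab.le
            · exact hx z (by simp [h])
      · simp only [hab, if_false]
        obtain ⟨g, x, he, hp, hx⟩ := ih (b :: t) (by simp at hf ⊢; omega)
        refine ⟨a :: g, x, by simp [he], hp.cons a, ?_⟩
        intro z hz
        rcases List.mem_cons.1 hz with h | h
        · subst h; exact (hx b (by simp)).trans (not_lt.1 hab)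
        · exact hx z h
    | [a], hf => simp at hf

theorem outer_go (n : Nat) : ∀ (fl : Nat) (f b : List Int), f.length = fl →
    f.length + b.length = n →
    (∀ x ∈ f, ∀ y ∈ b, y ≤ x) → b.Pairwise (fun p q => q ≤ p) →
    ((List.range' (n - fl) fl).foldl (fun l i => ppassN (n - i - 1) l) (f ++ b)).Perm (f ++ b) ∧
    ((List.range' (n - fl) fl).foldl (fun l i => ppassN (n - i - 1) l) (f ++ b)).Pairwise (fun p q => q ≤ p) := by
  intro fl
  induction fl with
  | zero =>
    intro f b hfl _ _ hb
    have hf : f = [] := List.length_eq_zero_iff.1 hfl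
    subst hf
    simp only [List.range'_zero, List.foldl_nil, List.nil_append]
    exact ⟨List.Perm.refl b, hb⟩
  | succ fl ih =>
    intro f b hfl hn hbd hb
    have hn' : n - (fl + 1) + 1 = n - fl := by omega
    rw [List.range'_succ, List.foldl_cons, hn']
    have hidx : n - (n - (fl + 1)) - 1 = fl := by omega
    rw [hidx]
    have hflt : fl < f.length := by omega
    rw [ppassN_append fl f b hflt]
    obtain ⟨g, x, he, hp, hx⟩ := ppassN_full fl f (by omega)
    rw [he, List.append_assoc]
    have hglen : g.length = fl := by
      have := hp.length_eq
      simp at this; omega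
    have hmemf : ∀ z, z ∈ g → z ∈ f := fun z hz => hp.mem_iff.1 (by simp [hz])
    have hxf : x ∈ f := hp.mem_iff.1 (by simp)
    have hbd' : ∀ z ∈ g, ∀ y ∈ (x :: b), y ≤ z := by
      intro z hz y hy
      rcases List.mem_cons.1 hy with h | h
      · subst h; exact hx z (hmemf z hz)
      · exact hbd z (hmemf z hz) y h
    have hb' : (x :: b).Pairwise (fun p q => q ≤ p) := by
      refine List.Pairwise.cons ?_ hb
      intro y hy; exact hbd x hxf y hy
    have hrec := ih g (x :: b) hglen (by simp at hn ⊢; omega) hbd' hb'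
    have hperm : (g ++ x :: b).Perm (f ++ b) := by
      have : (g ++ [x]).Perm f := hp
      have h2 : ((g ++ [x]) ++ b).Perm (f ++ b) := this.append_right b
      simpa [List.append_assoc] using h2
    exact ⟨hrec.1.trans hperm, hrec.2⟩

-- the expanded descending multiset the bucket walk traverses
def expandFrom (counts : List Int) (m : Int) : List Int :=
  (PySem.List.pyRange m 0 (-1)).flatMap (fun c => List.replicate (counts.count c) c)

theorem expandFrom_nonpos (counts : List Int) (m : Int) (h : m ≤ 0) :
    expandFrom counts m = [] := by
  simp [expandFrom, PySem.List.pyRange_neg_one_eq_nil h]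

theorem expandFrom_cons (counts : List Int) (m : Int) (h : 0 < m) :
    expandFrom counts m = List.replicate (counts.count m) m ++ expandFrom counts (m - 1) := by
  simp [expandFrom, PySem.List.pyRange_neg_one_cons h]

theorem count_expandFrom (counts : List Int) : ∀ (j : Nat) (m : Int), m.toNat = j → ∀ a,
    (expandFrom counts m).count a = if 1 ≤ a ∧ a ≤ m then counts.count a else 0 := by
  intro j
  induction j with
  | zero =>
    intro m hm a
    rw [expandFrom_nonpos counts m (by omega)]
    have : ¬ (1 ≤ a ∧ a ≤ m) := by omega
    simp [this]
  | succ j ih =>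
    intro m hm a
    rw [expandFrom_cons counts m (by omega), List.count_append, List.count_replicate,
      ih (m - 1) (by omega) a]
    by_cases hma : m = a
    · subst hma
      have h1 : ¬ (1 ≤ m ∧ m ≤ m - 1) := by omega
      have h2 : 1 ≤ m ∧ m ≤ m := by omega
      rw [if_neg h1, if_pos h2]
      simp
    · have hb : (m == a) = false := by simp [hma]
      rw [hb]
      by_cases h1 : 1 ≤ a ∧ a ≤ m - 1
      · have h2 : 1 ≤ a ∧ a ≤ m := by omega
        rw [if_pos h1, if_pos h2]
        simp
      · have h2 : ¬ (1 ≤ a ∧ a ≤ m) := by omega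
        rw [if_neg h1, if_neg h2]
        simp

theorem pairwise_expandFrom (counts : List Int) : ∀ (j : Nat) (m : Int), m.toNat = j →
    (expandFrom counts m).Pairwise (fun p q => q ≤ p) ∧ ∀ x ∈ expandFrom counts m, x ≤ m := by
  intro j
  induction j with
  | zero =>
    intro m hm
    rw [expandFrom_nonpos counts m (by omega)]
    simp
  | succ j ih =>
    intro m hm
    rw [expandFrom_cons counts m (by omega)]
    obtain ⟨ihp, ihb⟩ := ih (m - 1) (by omega)
    constructor
    · rw [List.pairwise_append]
      refine ⟨?_, ihp, ?_⟩
      · rw [List.pairwise_replicate]; right; exact le_refl m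
      · intro a ha b hb
        have ha' : a = m := List.eq_of_mem_replicate ha
        have hb' : b ≤ m - 1 := ihb b hb
        omega
    · intro x hx
      rcases List.mem_append.1 hx with h | h
      · exact (List.eq_of_mem_replicate h).le
      · have := ihb x h; omega

-- greedy bridge: the inner taking loop consumes a replicate block
theorem takeBucket_greedy (k c : Int) : ∀ (m : Nat) (rest : List Int) (sel tot : Int),
    greedyA k (List.replicate m c ++ rest) sel tot =
      match takeBucket k c m sel tot with
      | Sum.inl (s, t) => greedyA k rest s t
      | Sum.inr r => r := by
  intro m
  induction m with
  | zero => intro rest sel tot; simp [takeBucket]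
  | succ m ih =>
    intro rest sel tot
    rw [List.replicate_succ, List.cons_append]
    simp only [greedyA, takeBucket]
    by_cases h : tot + c ≥ k
    · simp [h]
    · simp only [h, if_false]
      exact ih rest (sel + 1) (tot + c)

theorem walkBuckets_greedy (k : Int) (bucket : PySem.Dict Int Int) :
    ∀ (cs : List Int) (sel tot : Int),
    walkBuckets k bucket cs sel tot =
      greedyA k (cs.flatMap (fun c => List.replicate (bucket.getD c 0).toNat c)) sel tot := by
  intro cs
  induction cs with
  | nil => intro sel tot; simp [walkBuckets, greedyA]
  | cons c cs ih =>
    intro sel tot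
    rw [List.flatMap_cons]
    rw [takeBucket_greedy k c (bucket.getD c 0).toNat _ sel tot]
    simp only [walkBuckets]
    cases htb : takeBucket k c (bucket.getD c 0).toNat sel tot with
    | inl p => cases p with | mk s t => simp [ih]
    | inr r => simp

-- both counting loops build Counter(tangerine)
theorem countA_eq_counter (t : List Int) :
    t.foldl (fun d s => if d.contains s then d.insert s (d.getD s 0 + 1) else d.insert s 1)
      PySem.Dict.empty = PySem.Dict.counter t := by
  rw [← PySem.Dict.foldl_insert_getD_add_one_eq_counter]
  apply PySem.List.foldl_congr_mem
  intro d s _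
  by_cases h : d.contains s
  · simp [h]
  · have h0 : d.getD s 0 = 0 :=
      PySem.Dict.getD_of_not_contains d 0 (by simpa using h)
    simp [h, h0]

-- the running max step is `max`
theorem max_step_eq : (fun (m c : Int) => if m < c then c else m) = max := by
  funext m c
  by_cases h : m < c
  · simp [h, max_eq_right h.le]
  · simp [h, max_eq_left (not_lt.1 h)]

-- every count in Counter(t).values is positive
theorem counter_values_pos (t : List Int) :
    ∀ v ∈ (PySem.Dict.counter t).values, 1 ≤ v := by
  intro v hv
  simp only [PySem.Dict.values, PySem.Dict.items_counter, List.map_map, List.mem_map] at hv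
  obtain ⟨key, hk, hveq⟩ := hv
  have hkt : key ∈ t := (PySem.Set.mem_ofList t key).1 hk
  have : 0 < t.count key := List.count_pos_iff.2 hkt
  simp only [Function.comp] at hveq
  omega

theorem solution_eq_alt (k : Int) (tangerine : List Int) :
    solution k tangerine = solution_alt k tangerine := by
  simp only [solution, solution_alt, countA_eq_counter,
    ← PySem.Dict.foldl_insert_getD_add_one_eq_counter]
  rw [PySem.Dict.foldl_insert_getD_add_one_eq_counter]
  set counts := (PySem.Dict.counter tangerine).values with hcounts
  -- B side: split the pair fold
  rw [PySem.List.foldl_prod_mk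
    (fun d c => PySem.Dict.insert d c (d.getD c 0 + 1))
    (fun m c => if m < c then c else m) counts PySem.Dict.empty 0]
  rw [PySem.Dict.foldl_insert_getD_add_one_eq_counter]
  set mx := counts.foldl (fun m c => if m < c then c else m) 0 with hmx
  -- B = greedy over the expanded descending multiset
  rw [walkBuckets_greedy]
  have hexp : counts.foldl (fun m c => if m < c then c else m) 0 = counts.foldl max 0 := by
    rw [max_step_eq]
  have hflat : (PySem.List.pyRange mx 0 (-1)).flatMap
      (fun c => List.replicate ((PySem.Dict.counter counts).getD c 0).toNat c)
      = expandFrom counts mx := by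
    unfold expandFrom
    congr 1
    funext c
    rw [PySem.Dict.getD_counter]
    simp
  rw [hflat]
  -- bounds on counts
  have hpos : ∀ v ∈ counts, 1 ≤ v := counter_values_pos tangerine
  have hle : ∀ v ∈ counts, v ≤ mx := by
    intro v hv
    rw [hmx, hexp]
    exact (PySem.List.le_foldl_max counts 0).2 v hv
  have hmx0 : 0 ≤ mx := by
    rw [hmx, hexp]
    exact (PySem.List.le_foldl_max counts 0).1
  -- expandFrom counts mx is a permutation of counts
  have hperm : (expandFrom counts mx).Perm counts := by
    rw [List.perm_iff_count]
    intro a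
    rw [count_expandFrom counts mx.toNat mx rfl a]
    by_cases h : 1 ≤ a ∧ a ≤ mx
    · simp [h]
    · have : counts.count a = 0 := by
        rw [List.count_eq_zero]
        intro hmem
        exact h ⟨hpos a hmem, hle a hmem⟩
      simp [h, this]
  obtain ⟨hpw, _⟩ := pairwise_expandFrom counts mx.toNat mx rfl
  -- A side: the bubble loops sort counts descending
  have hn : ((counts.length : Int)).toNat = counts.length := by omega
  have houter :
      ((PySem.List.pyRange 0 (counts.length : Int) 1).foldl
        (fun l i => (PySem.List.pyRange 0 ((counts.length : Int) - i - 1) 1).foldl bubbleStep l)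
        counts).Perm counts ∧
      ((PySem.List.pyRange 0 (counts.length : Int) 1).foldl
        (fun l i => (PySem.List.pyRange 0 ((counts.length : Int) - i - 1) 1).foldl bubbleStep l)
        counts).Pairwise (fun p q => q ≤ p) := by
    rw [PySem.List.pyRange_zero, List.foldl_map, hn]
    have hcongr : List.foldl
        (fun l (i : Nat) => (PySem.List.pyRange 0 ((counts.length : Int) - i - 1) 1).foldl bubbleStep l)
        counts (List.range counts.length)
        = List.foldl (fun l (i : Nat) => ppassN (counts.length - i - 1) l) counts
            (List.range counts.length) := by
      apply PySem.List.foldl_congr_mem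
      intro l i hi
      rw [inner_eq_ppassN]
      congr 1
      have : i < counts.length := List.mem_range.1 hi
      omega
    rw [hcongr, List.range_eq_range']
    have := outer_go counts.length counts.length counts [] rfl (by simp) (by simp) (by simp)
    simpa using this
  -- the two descending lists coincide
  have heq : ((PySem.List.pyRange 0 (counts.length : Int) 1).foldl
      (fun l i => (PySem.List.pyRange 0 ((counts.length : Int) - i - 1) 1).foldl bubbleStep l)
      counts) = expandFrom counts mx := by
    apply PySem.List.eq_of_perm_of_pairwise_le_of_injective (fun x : Int => -x) neg_injective
    · exact houter.1.trans hperm.symm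
    · exact houter.2.imp (fun h => by omega)
    · exact hpw.imp (fun h => by omega)
  rw [heq]

-- ===== VERDICT (by name: the statement is the Claim_ definition above) =====
theorem solution_spec : Claim_equal_solution := by
  intro k tangerine _
  unfold Spec_solution
  exact solution_eq_alt k tangerine
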